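-- pv_equiv track=rewrite | github.com/sywrahg/URI | 1238 - Combinador.py | combinando
-- ===== SOURCE A (Python) =====
-- def combinando(lista1, lista2):
--     resposta = []
--     string = ''
--     if len(lista1) == len(lista2):
--         for i in zip(lista1, lista2):
--             resposta.append(i[0]+i[1])
--         for i in resposta:
--             string += i
--         return string
--     else:
--         if len(lista1) > len(lista2):
--             maior = lista1
--             menor = lista2
--
--         elif len(lista1) < len(lista2):
--             maior = lista2
--             menor = lista1
--
--         diferenca = (len(maior) - len(menor))
--         for i in zip(lista1, lista2):
--             resposta.append(i[0]+i[1])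
--         for item in maior[-diferenca:]:
--             resposta.append(item)
--         for i in resposta:
--             string += i
--         return string
-- ===== SOURCE B (Python) =====
-- def combinando(lista1, lista2):
--     return ''.join(
--         (lista1[i] if i < len(lista1) else '') + (lista2[i] if i < len(lista2) else '')
--         for i in range(max(len(lista1), len(lista2))))
-- ===== Notes on version B (the rewrite author's own statement) =====
-- stated objective: simpler
-- what changed: Replaces A's length-comparison branching, separate zip loop, slice-tail loop and string-accumulation loop with a single indexed pass over range(max(len1,len2)) that pads the shorter list with '' and joins everything with ''.join.
import Mathlib
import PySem

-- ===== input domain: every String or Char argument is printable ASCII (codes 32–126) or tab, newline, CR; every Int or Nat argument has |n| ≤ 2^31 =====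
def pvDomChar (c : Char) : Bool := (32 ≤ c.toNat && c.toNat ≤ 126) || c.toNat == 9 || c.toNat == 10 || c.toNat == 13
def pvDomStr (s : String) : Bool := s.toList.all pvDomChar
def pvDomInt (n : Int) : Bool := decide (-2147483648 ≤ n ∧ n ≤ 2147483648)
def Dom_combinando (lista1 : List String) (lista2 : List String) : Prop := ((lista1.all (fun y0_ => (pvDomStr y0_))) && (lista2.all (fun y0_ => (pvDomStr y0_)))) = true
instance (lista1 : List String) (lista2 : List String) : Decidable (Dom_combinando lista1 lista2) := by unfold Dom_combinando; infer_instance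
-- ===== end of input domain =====

-- B replaces A's length branching, zip loop, tail-slice loop and string accumulation
-- with one indexed pass padding the shorter list with '' joined by ''.join (simpler).


-- ===== PORT A =====
def combinando (lista1 : List String) (lista2 : List String) : String :=
  let resposta : List String := []
  let string : String := ""
  if lista1.length = lista2.length then
    let resposta := (lista1.zip lista2).foldl (fun r i => r ++ [i.1 ++ i.2]) resposta
    resposta.foldl (fun s i => s ++ i) string
  else
    let mm : List String × List String :=
      if lista1.length > lista2.length then (lista1, lista2) else (lista2, lista1)
    let maior := mm.1
    let menor := mm.2
    let diferenca : Int := (maior.length : Int) - (menor.length : Int)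
    let resposta := (lista1.zip lista2).foldl (fun r i => r ++ [i.1 ++ i.2]) resposta
    let resposta := (PySem.List.slice maior (some (-diferenca)) none).foldl (fun r item => r ++ [item]) resposta
    resposta.foldl (fun s i => s ++ i) string

-- ===== PORT B =====
def combinando_alt (lista1 : List String) (lista2 : List String) : String :=
  PySem.Str.join "" ((PySem.List.pyRange 0 ((max lista1.length lista2.length : Nat) : Int) 1).map
    (fun i =>
      (if i < (lista1.length : Int) then PySem.List.pyGetD lista1 i "" else "")
      ++ (if i < (lista2.length : Int) then PySem.List.pyGetD lista2 i "" else "")))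

-- ===== PRECONDITION & SPEC =====
def Spec_combinando (lista1 : List String) (lista2 : List String) (out : String) : Prop := out = combinando_alt lista1 lista2
instance (lista1 : List String) (lista2 : List String) (out : String) : Decidable (Spec_combinando lista1 lista2 out) := by unfold Spec_combinando; infer_instance

-- ===== CLAIM (what is proved, stated in full; the proofs are below) =====
def Claim_equal_combinando : Prop := ∀ (lista1 : List String) (lista2 : List String), Dom_combinando lista1 lista2 → Spec_combinando lista1 lista2 (combinando lista1 lista2)

-- ===== LEMMAS AND PROOFS =====

-- A's trailing 'string += i' loop, on the character-list side.
theorem pv_cat_toList (l : List String) (s : String) :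
    (l.foldl (fun a i => a ++ i) s).toList = s.toList ++ (l.map String.toList).flatten := by
  induction l generalizing s with
  | nil => simp
  | cons x xs ih => simp [ih]

theorem pv_intercalate_nil (l : List (List Char)) : ([] : List Char).intercalate l = l.flatten := by
  induction l with
  | nil => rfl
  | cons x xs ih => cases xs <;> simp_all [List.intercalate, List.intersperse]

theorem pv_join_toList (l : List String) :
    (PySem.Str.join "" l).toList = (l.map String.toList).flatten := by
  simp [PySem.Str.join, PySem.Chars.join, pv_intercalate_nil]

theorem pv_map_getD_range (l : List String) :
    (List.range l.length).map (fun k => l.getD k "") = l := by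
  induction l with
  | nil => rfl
  | cons x xs ih =>
    simp only [List.length_cons, List.range_succ_eq_map, List.map_cons, List.map_map]
    simpa using ih

-- B's single indexed pass, characterised as A's zip part followed by the leftover tail.
theorem pv_key : ∀ (l1 l2 : List String),
    (List.range (max l1.length l2.length)).map (fun k =>
      (if k < l1.length then l1.getD k "" else "") ++ (if k < l2.length then l2.getD k "" else ""))
    = (l1.zip l2).map (fun p => p.1 ++ p.2) ++ l1.drop l2.length ++ l2.drop l1.length := by
  intro l1
  induction l1 with
  | nil =>
    intro l2
    simp only [List.length_nil, Nat.max_eq_right (Nat.zero_le _), List.zip_nil_left,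
      List.map_nil, List.nil_append, List.drop_zero, List.drop_nil]
    rw [List.map_congr_left (g := fun k => l2.getD k "") (fun k hk => by
      rw [if_neg (by omega), if_pos (List.mem_range.mp hk)]
      simp)]
    exact pv_map_getD_range l2
  | cons x xs ih =>
    intro l2
    cases l2 with
    | nil =>
      simp only [List.length_nil, Nat.max_eq_left (Nat.zero_le _), List.zip_nil_right,
        List.map_nil, List.nil_append, List.drop_zero, List.drop_nil, List.append_nil]
      rw [List.map_congr_left (g := fun k => (x :: xs).getD k "") (fun k hk => by
        rw [if_pos (List.mem_range.mp hk), if_neg (by omega)]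
        simp)]
      exact pv_map_getD_range (x :: xs)
    | cons y ys =>
      have hm : max (x :: xs).length (y :: ys).length = max xs.length ys.length + 1 := by
        simp [Nat.succ_max_succ]
      rw [hm, List.range_succ_eq_map, List.map_cons, List.map_map]
      have hhead : ((if 0 < (x :: xs).length then (x :: xs).getD 0 "" else "")
          ++ (if 0 < (y :: ys).length then (y :: ys).getD 0 "" else "")) = x ++ y := by
        simp
      have htail : ∀ k, ((fun k =>
            (if k < (x :: xs).length then (x :: xs).getD k "" else "")
            ++ (if k < (y :: ys).length then (y :: ys).getD k "" else "")) ∘ Nat.succ) k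
          = (if k < xs.length then xs.getD k "" else "") ++ (if k < ys.length then ys.getD k "" else "") := by
        intro k
        simp only [Function.comp_apply, List.length_cons, Nat.succ_lt_succ_iff, List.getD_cons_succ]
      rw [hhead, List.map_congr_left (fun k _ => htail k), ih ys]
      simp

-- the negative-start slice maior[-diferenca:] is a drop
theorem pv_clamp (n m : Nat) (h : m < n) : PySem.List.clampIdx n ((m : Int) - (n : Int)) = m := by
  unfold PySem.List.clampIdx
  split_ifs with h1 h2 <;> omega

theorem pv_alt_eq (l1 l2 : List String) :
    (combinando_alt l1 l2).toList =
      (((l1.zip l2).map (fun p => p.1 ++ p.2) ++ l1.drop l2.length ++ l2.drop l1.length).map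
        String.toList).flatten := by
  unfold combinando_alt
  rw [pv_join_toList, PySem.List.pyRange_zero_nat, ← pv_key l1 l2]
  simp only [List.map_map]
  congr 1
  apply List.map_congr_left
  intro k _
  simp [PySem.List.pyGetD_natCast]

-- ===== VERDICT (by name: the statement is the Claim_ definition above) =====
theorem combinando_spec : Claim_equal_combinando := by
  intro l1 l2 _
  show combinando l1 l2 = combinando_alt l1 l2
  apply String.toList_inj.mp
  rw [pv_alt_eq]
  unfold combinando
  by_cases h : l1.length = l2.length
  · rw [if_pos h]
    rw [PySem.List.foldl_append_singleton_eq_map, pv_cat_toList,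
      show l1.drop l2.length = [] from (by rw [← h]; exact List.drop_length),
      show l2.drop l1.length = [] from (by rw [h]; exact List.drop_length)]
    simp
  · rw [if_neg h]
    by_cases hg : l1.length > l2.length
    · rw [if_pos hg]
      simp only
      rw [show -((l1.length : Int) - (l2.length : Int)) = (l2.length : Int) - (l1.length : Int) by ring,
        PySem.List.slice_some_none, pv_clamp _ _ hg,
        PySem.List.foldl_append_singleton_eq_map, PySem.List.foldl_append_singleton_eq_map,
        pv_cat_toList]
      simp [List.drop_eq_nil_of_le (Nat.le_of_lt hg)]
    · have hlt : l1.length < l2.length := by omega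
      have hle : l1.length ≤ l2.length := Nat.le_of_lt hlt
      rw [if_neg hg]
      simp only
      rw [show -((l2.length : Int) - (l1.length : Int)) = (l1.length : Int) - (l2.length : Int) by ring,
        PySem.List.slice_some_none, pv_clamp _ _ hlt,
        PySem.List.foldl_append_singleton_eq_map, PySem.List.foldl_append_singleton_eq_map,
        pv_cat_toList]
      simp [List.drop_eq_nil_of_le hle]
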